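-- pv_equiv track=rewrite | github.com/manu3618/legendary-potato | src/legendary_potato/kernel.py | p_spectrum
-- ===== SOURCE A (Python) =====
-- from collections import Counter, defaultdict
--
-- def p_spectrum(x1, x2, p=2):
--     """p-spectrum kernel
--
--     number of common subsequences of length 'p'.
--     """
--     if p == 0:
--         return 0
--     s1 = Counter(
--         "".join(seq) for seq in zip(x1[i : i + p] for i in range(len(x1)))
--     )
--     s2 = Counter(
--         "".join(seq) for seq in zip(x2[i : i + p] for i in range(len(x2)))
--     )
--     return sum(s1[seq] * s2[seq] for seq in s1 if len(seq) == p)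
-- ===== SOURCE B (Python) =====
-- def p_spectrum(x1, x2, p=2):
--     """p-spectrum kernel
--
--     number of common subsequences of length 'p'.
--     """
--     if p == 0:
--         return 0
--     total = 0
--     for i in range(len(x1)):
--         u = x1[i:i + p]
--         if len(u) != p:
--             continue
--         for j in range(len(x2)):
--             if x2[j:j + p] == u:
--                 total += 1
--     return total
-- ===== Notes on version B (the rewrite author's own statement) =====
-- stated objective: alternative
-- what changed: Replaces the two Counter histograms and the sum of count products over distinct substrings by a direct double loop that counts matching (i,j) pairs of length-p slices.
import Mathlib
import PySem

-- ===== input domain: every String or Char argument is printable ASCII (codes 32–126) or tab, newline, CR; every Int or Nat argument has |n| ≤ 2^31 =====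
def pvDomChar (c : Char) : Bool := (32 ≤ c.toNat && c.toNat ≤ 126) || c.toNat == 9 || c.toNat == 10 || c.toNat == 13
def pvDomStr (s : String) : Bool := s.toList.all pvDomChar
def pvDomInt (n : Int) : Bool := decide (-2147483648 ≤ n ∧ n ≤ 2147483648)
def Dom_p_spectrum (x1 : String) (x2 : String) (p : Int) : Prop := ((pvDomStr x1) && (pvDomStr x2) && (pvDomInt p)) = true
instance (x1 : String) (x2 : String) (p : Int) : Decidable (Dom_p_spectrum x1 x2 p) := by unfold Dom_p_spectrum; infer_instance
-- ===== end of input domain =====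

-- B counts matching (i,j) slice pairs directly instead of multiplying two Counter
-- histograms; objective: alternative (genuinely different algorithm, similar size).

-- ===== PORT A =====
-- Counter("".join(seq) for seq in zip(x[i:i+p] for i in range(len(x)))):
-- zip of one generator yields 1-tuples, so "".join(seq) is just the slice x[i:i+p].
def pA_counterOf (x : String) (p : Int) : PySem.Dict String Int :=
  PySem.Dict.counter
    ((PySem.List.pyRange 0 (PySem.Str.len x) 1).map
      (fun i => PySem.Str.slice x (some i) (some (i + p))))

def p_spectrum (x1 : String) (x2 : String) (p : Int) : Int :=
  if p = 0 then 0
  else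
    let s1 := pA_counterOf x1 p
    let s2 := pA_counterOf x2 p
    -- sum(s1[seq] * s2[seq] for seq in s1 if len(seq) == p)
    s1.keys.foldl
      (fun acc seq =>
        if PySem.Str.len seq = p then acc + s1.getD seq 0 * s2.getD seq 0 else acc) 0

-- ===== PORT B =====
def p_spectrum_alt (x1 : String) (x2 : String) (p : Int) : Int :=
  if p = 0 then 0
  else
    (PySem.List.pyRange 0 (PySem.Str.len x1) 1).foldl
      (fun total i =>
        let u := PySem.Str.slice x1 (some i) (some (i + p))
        if PySem.Str.len u ≠ p then total   -- 'continue'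
        else
          (PySem.List.pyRange 0 (PySem.Str.len x2) 1).foldl
            (fun t j =>
              if PySem.Str.slice x2 (some j) (some (j + p)) = u then t + 1 else t)
            total)
      0

-- ===== PRECONDITION & SPEC =====
def Spec_p_spectrum (x1 : String) (x2 : String) (p : Int) (out : Int) : Prop := out = p_spectrum_alt x1 x2 p
instance (x1 : String) (x2 : String) (p : Int) (out : Int) : Decidable (Spec_p_spectrum x1 x2 p out) := by unfold Spec_p_spectrum; infer_instance

-- ===== CLAIM (what is proved, stated in full; the proofs are below) =====
def Claim_equal_p_spectrum : Prop := ∀ (x1 : String) (x2 : String) (p : Int), Dom_p_spectrum x1 x2 p → Spec_p_spectrum x1 x2 p (p_spectrum x1 x2 p)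

-- ===== LEMMAS AND PROOFS =====

-- The slice list both programs traverse.
def slicesOf (x : String) (p : Int) : List String :=
  (PySem.List.pyRange 0 (PySem.Str.len x) 1).map
    (fun i => PySem.Str.slice x (some i) (some (i + p)))

theorem foldl_count_eq (L : List String) (u : String) (t : Int) :
    L.foldl (fun t v => if v = u then t + 1 else t) t = t + (L.count u : Int) := by
  induction L generalizing t with
  | nil => simp
  | cons a L ih =>
    simp only [List.foldl_cons, List.count_cons, ih]
    by_cases h : a = u
    · simp [h]; ring
    · simp [h]

theorem foldl_if_add_eq_sum (L : List String) (c : String → Prop) [DecidablePred c]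
    (g : String → Int) (t : Int) :
    L.foldl (fun acc k => if c k then acc + g k else acc) t
      = t + (L.map (fun k => if c k then g k else 0)).sum := by
  induction L generalizing t with
  | nil => simp
  | cons a L ih =>
    simp only [List.foldl_cons, List.map_cons, List.sum_cons, ih]
    by_cases h : c a
    · simp [h]; ring
    · simp [h]

theorem foldl_add_eq_sum (L : List String) (g : String → Int) (t : Int) :
    L.foldl (fun acc k => acc + g k) t = t + (L.map g).sum := by
  induction L generalizing t with
  | nil => simp
  | cons a L ih => simp [List.foldl_cons, ih]; ring

-- String's own BEq is definitionally the one DecidableEq induces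
theorem count_beq_eq (l : List String) (k : String) :
    (l.count k : Int) = (@List.count String (instBEqOfDecidableEq) k l : Int) := rfl

theorem sum_over_dedup (l : List String) (f : String → Int) :
    ((PySem.Set.ofList l).map (fun k => (l.count k : Int) * f k)).sum
      = (l.map f).sum := by
  have hnd : (PySem.Set.ofList l).Nodup := PySem.Set.nodup_ofList l
  have hfin : (PySem.Set.ofList l).toFinset = l.toFinset := by
    ext x
    simp [List.mem_toFinset, PySem.Set.mem_ofList]
  calc ((PySem.Set.ofList l).map (fun k => (l.count k : Int) * f k)).sum
      = (PySem.Set.ofList l).toFinset.sum (fun k => (l.count k : Int) * f k) :=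
        (List.sum_toFinset _ hnd).symm
    _ = l.toFinset.sum (fun k => (l.count k : Int) * f k) := by rw [hfin]
    _ = (l.map f).sum := by
        rw [Finset.sum_list_map_count l f]
        refine Finset.sum_congr rfl (fun m _ => ?_)
        rw [nsmul_eq_mul, ← count_beq_eq]

-- B computes Σ_{u slice of x1, |u| = p} (number of slices of x2 equal to u)
theorem alt_eq_sum (x1 x2 : String) (p : Int) (hp : p ≠ 0) :
    p_spectrum_alt x1 x2 p
      = ((slicesOf x1 p).map
          (fun u => if PySem.Str.len u = p then ((slicesOf x2 p).count u : Int) else 0)).sum := by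
  unfold p_spectrum_alt
  rw [if_neg hp]
  have h1 : (PySem.List.pyRange 0 (PySem.Str.len x1) 1).foldl
      (fun (total : Int) i =>
        let u := PySem.Str.slice x1 (some i) (some (i + p))
        if PySem.Str.len u ≠ p then total
        else
          (PySem.List.pyRange 0 (PySem.Str.len x2) 1).foldl
            (fun t j =>
              if PySem.Str.slice x2 (some j) (some (j + p)) = u then t + 1 else t)
            total) (0 : Int)
      = (slicesOf x1 p).foldl
        (fun total u =>
          if PySem.Str.len u ≠ p then total
          else
            (PySem.List.pyRange 0 (PySem.Str.len x2) 1).foldl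
              (fun t j =>
                if PySem.Str.slice x2 (some j) (some (j + p)) = u then t + 1 else t)
              total) 0 :=
    (List.foldl_map (f := fun i => PySem.Str.slice x1 (some i) (some (i + p)))
      (g := fun total u =>
        if PySem.Str.len u ≠ p then total
        else
          (PySem.List.pyRange 0 (PySem.Str.len x2) 1).foldl
            (fun t j =>
              if PySem.Str.slice x2 (some j) (some (j + p)) = u then t + 1 else t)
            total)).symm
  rw [h1]
  have hB : (fun (total : Int) (u : String) =>
        if PySem.Str.len u ≠ p then total
        else
          (PySem.List.pyRange 0 (PySem.Str.len x2) 1).foldl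
            (fun t j =>
              if PySem.Str.slice x2 (some j) (some (j + p)) = u then t + 1 else t)
            total)
      = (fun (total : Int) (u : String) =>
          total + (if PySem.Str.len u = p then ((slicesOf x2 p).count u : Int) else 0)) := by
    funext total u
    by_cases h : PySem.Str.len u = p
    · rw [if_neg (not_not.mpr h), if_pos h]
      have h2 : (slicesOf x2 p).foldl (fun t v => if v = u then t + 1 else t) total
          = (PySem.List.pyRange 0 (PySem.Str.len x2) 1).foldl
              (fun t j =>
                if PySem.Str.slice x2 (some j) (some (j + p)) = u then t + 1 else t)
              total :=
        List.foldl_map (f := fun j => PySem.Str.slice x2 (some j) (some (j + p)))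
          (g := fun t v => if v = u then t + 1 else t)
      rw [← h2, foldl_count_eq]
    · rw [if_pos h, if_neg h, add_zero]
  rw [hB, foldl_add_eq_sum, zero_add]

-- A computes Σ over distinct slices of x1 of count1 * count2, filtered by length p
theorem a_eq_sum (x1 x2 : String) (p : Int) (hp : p ≠ 0) :
    p_spectrum x1 x2 p
      = ((PySem.Set.ofList (slicesOf x1 p)).map
          (fun k => if PySem.Str.len k = p
            then ((slicesOf x1 p).count k : Int) * ((slicesOf x2 p).count k : Int) else 0)).sum := by
  unfold p_spectrum pA_counterOf
  rw [if_neg hp]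
  show (PySem.Dict.counter (slicesOf x1 p)).keys.foldl
      (fun acc seq =>
        if PySem.Str.len seq = p then
          acc + (PySem.Dict.counter (slicesOf x1 p)).getD seq 0
              * (PySem.Dict.counter (slicesOf x2 p)).getD seq 0
        else acc) 0 = _
  simp only [PySem.Dict.keys_counter, PySem.Dict.getD_counter]
  rw [foldl_if_add_eq_sum (PySem.Set.ofList (slicesOf x1 p))
        (fun k => PySem.Str.len k = p)
        (fun k => ((slicesOf x1 p).count k : Int) * ((slicesOf x2 p).count k : Int)) 0,
      zero_add]

theorem p_spectrum_eq (x1 x2 : String) (p : Int) :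
    p_spectrum x1 x2 p = p_spectrum_alt x1 x2 p := by
  by_cases hp : p = 0
  · simp [p_spectrum, p_spectrum_alt, hp]
  · rw [a_eq_sum x1 x2 p hp, alt_eq_sum x1 x2 p hp]
    rw [← sum_over_dedup (slicesOf x1 p)
          (fun u => if PySem.Str.len u = p then ((slicesOf x2 p).count u : Int) else 0)]
    refine congrArg List.sum ?_
    exact List.map_congr_left (fun k _ => by rw [mul_ite, mul_zero])

-- ===== VERDICT (by name: the statement is the Claim_ definition above) =====
theorem p_spectrum_spec : Claim_equal_p_spectrum := by
  intro x1 x2 p _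
  exact p_spectrum_eq x1 x2 p
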